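-- pv_equiv track=rewrite | github.com/mohamed-naser-awd/pgstorm | pgstorm/engine/query_utils.py | to_asyncpg_format
-- ===== SOURCE A (Python) =====
-- def to_asyncpg_format(query: str, params: list) -> tuple[str, list]:
--     """
--     Convert %s-style query to asyncpg $1, $2, ... format.
--     """
--     result: list[str] = []
--     idx = 1
--     i = 0
--     while i < len(query):
--         if query[i : i + 2] == "%s":
--             result.append(f"${idx}")
--             idx += 1
--             i += 2
--         else:
--             result.append(query[i])
--             i += 1
--     return "".join(result), params
-- ===== SOURCE B (Python) =====
-- def to_asyncpg_format(query: str, params: list) -> tuple[str, list]: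
--     """
--     Convert %s-style query to asyncpg $1, $2, ... format.
--     """
--     parts = query.split("%s")
--     out = parts[0]
--     i = 1
--     for part in parts[1:]:
--         out += f"${i}" + part
--         i += 1
--     return out, params
-- ===== Notes on version B (the rewrite author's own statement) =====
-- stated objective: simpler
-- what changed: Replaces A's per-character while-loop scan (with two-char slice tests and index bookkeeping) by splitting the query on "%s" once and rebuilding it from the segments, interleaving $1,$2,... between them.
import Mathlib
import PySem

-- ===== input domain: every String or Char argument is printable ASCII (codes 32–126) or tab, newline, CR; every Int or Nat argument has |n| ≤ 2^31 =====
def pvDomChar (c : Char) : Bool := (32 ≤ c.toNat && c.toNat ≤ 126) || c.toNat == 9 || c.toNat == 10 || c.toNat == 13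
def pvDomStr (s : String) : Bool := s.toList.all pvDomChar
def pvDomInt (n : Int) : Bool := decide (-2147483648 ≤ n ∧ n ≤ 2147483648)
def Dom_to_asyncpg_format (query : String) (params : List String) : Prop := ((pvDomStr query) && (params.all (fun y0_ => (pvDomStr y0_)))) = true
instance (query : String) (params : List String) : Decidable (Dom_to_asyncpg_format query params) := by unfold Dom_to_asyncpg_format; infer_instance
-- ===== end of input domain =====

-- B replaces A's per-character scan with split("%s") + segment-level rebuild (objective: simpler).

-- ===== PORT A =====
-- A's while-loop: at each position, if the two-char slice equals "%s" emit "$idx"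
-- and advance by 2, else copy the character and advance by 1.
def toAsyncpgScan : List Char → Int → List Char
  | [], _ => []
  | '%' :: 's' :: rest, idx => '$' :: PySem.Int.toChars idx ++ toAsyncpgScan rest (idx + 1)
  | c :: rest, idx => c :: toAsyncpgScan rest idx

def to_asyncpg_format (query : String) (params : List String) : String × List String :=
  (String.ofList (toAsyncpgScan query.toList 1), params)

-- ===== PORT B =====
-- the for-loop of Source B: out += f"${i}" + part; i += 1, state (out, i)
def to_asyncpg_format_alt (query : String) (params : List String) : String × List String :=
  let parts := PySem.Chars.splitOn query.toList ['%', 's']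
  let out := ((parts.drop 1).foldl
      (fun (st : List Char × Int) part => (st.1 ++ '$' :: PySem.Int.toChars st.2 ++ part, st.2 + 1))
      (parts.headD [], 1)).1
  (String.ofList out, params)

-- ===== PRECONDITION & SPEC =====
def Spec_to_asyncpg_format (query : String) (params : List String) (out : String × List String) : Prop := out = to_asyncpg_format_alt query params
instance (query : String) (params : List String) (out : String × List String) : Decidable (Spec_to_asyncpg_format query params out) := by unfold Spec_to_asyncpg_format; infer_instance

-- ===== CLAIM (what is proved, stated in full; the proofs are below) =====
def Claim_equal_to_asyncpg_format : Prop := ∀ (query : String) (params : List String), Dom_to_asyncpg_format query params → Spec_to_asyncpg_format query params (to_asyncpg_format query params)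

-- ===== LEMMAS AND PROOFS =====

-- a pure recursive characterisation of splitOn · ['%','s']
def pvSplit : List Char → List (List Char)
  | [] => [[]]
  | '%' :: 's' :: t => [] :: pvSplit t
  | c :: t =>
    match pvSplit t with
    | [] => [[c]]
    | h :: r => (c :: h) :: r

-- conditional unfolding of toAsyncpgScan / pvSplit at a non-"%s" head
theorem scan_cons (c : Char) (t : List Char) (idx : Int)
    (h : ∀ t1, c = '%' → t = 's' :: t1 → False) :
    toAsyncpgScan (c :: t) idx = c :: toAsyncpgScan t idx :=
  toAsyncpgScan.eq_3 idx c t h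

theorem pvSplit_cons (c : Char) (t : List Char)
    (h : ∀ t1, c = '%' → t = 's' :: t1 → False) :
    pvSplit (c :: t) = match pvSplit t with
      | [] => [[c]]
      | hd :: r => (c :: hd) :: r :=
  pvSplit.eq_3 c t h

theorem pvSplit_ne_nil (l : List Char) : pvSplit l ≠ [] := by
  induction l using pvSplit.induct with
  | case1 => simp [pvSplit]
  | case2 t ih => simp [pvSplit]
  | case3 c t h1 heq ih => rw [pvSplit_cons c t h1, heq]; simp
  | case4 c t h1 a b heq ih => rw [pvSplit_cons c t h1, heq]; simp


theorem splitOn_go_spec (fuel : Nat) :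
    ∀ (l cur : List Char) (accs : List (List Char)), l.length < fuel →
      PySem.Chars.splitOn.go ['%', 's'] fuel l cur accs =
        accs.reverse ++ (pvSplit l).modifyHead (cur.reverse ++ ·) := by
  induction fuel with
  | zero => intro l cur accs h; omega
  | succ fuel ih =>
    intro l cur accs h
    cases l with
    | nil => simp [PySem.Chars.splitOn.go, pvSplit]
    | cons c rest =>
      rw [PySem.Chars.splitOn.go]
      by_cases hp : ['%', 's'].isPrefixOf (c :: rest) = true
      · obtain ⟨t, ht⟩ : ∃ t, c = '%' ∧ rest = 's' :: t := by
          obtain ⟨u, hu⟩ := List.isPrefixOf_iff_prefix.mp hp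
          simp only [List.cons_append, List.nil_append, List.cons.injEq] at hu
          exact ⟨u, hu.1.symm, hu.2.symm⟩
        obtain ⟨hc, hr⟩ := ht; subst hc; subst hr
        simp only [hp, if_pos]
        have hd : List.drop (['%', 's'] : List Char).length ('%' :: 's' :: t) = t := rfl
        rw [hd, ih t [] (cur.reverse :: accs) (by simp at h ⊢; omega)]
        simp [pvSplit]
        cases pvSplit t with
        | nil => simp
        | cons a b => simp
      · simp only [hp, if_neg, Bool.false_eq_true, not_false_eq_true]
        rw [ih rest (c :: cur) accs (by simp at h ⊢; omega)]
        have hnp : ∀ t1, c = '%' → rest = 's' :: t1 → False := by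
          intro t1 e1 e2; apply hp; subst e1; subst e2; simp [List.isPrefixOf]
        rw [pvSplit_cons c rest hnp]
        cases hS : pvSplit rest with
        | nil => exact absurd hS (pvSplit_ne_nil rest)
        | cons a b => simp

theorem splitOn_eq_pvSplit (l : List Char) :
    PySem.Chars.splitOn l ['%', 's'] = pvSplit l := by
  rw [PySem.Chars.splitOn]
  rw [splitOn_go_spec (l.length + 1) l [] [] (by omega)]
  cases hS : pvSplit l with
  | nil => exact absurd hS (pvSplit_ne_nil l)
  | cons a b => simp

-- the tail of the rebuild: "$i" ++ part for each remaining segment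
def pvTail : List (List Char) → Int → List Char
  | [], _ => []
  | p :: ps, i => '$' :: PySem.Int.toChars i ++ p ++ pvTail ps (i + 1)

theorem foldl_rebuild (ps : List (List Char)) :
    ∀ (acc : List Char) (i : Int),
      (ps.foldl (fun (st : List Char × Int) part =>
          (st.1 ++ '$' :: PySem.Int.toChars st.2 ++ part, st.2 + 1)) (acc, i)).1
        = acc ++ pvTail ps i := by
  induction ps with
  | nil => intro acc i; simp [pvTail]
  | cons p ps ih =>
    intro acc i
    rw [List.foldl_cons, ih]
    simp [pvTail, List.append_assoc]

theorem scan_eq_split (l : List Char) :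
    ∀ (idx : Int),
      toAsyncpgScan l idx = (pvSplit l).headD [] ++ pvTail ((pvSplit l).drop 1) idx := by
  induction l using pvSplit.induct with
  | case1 => intro idx; simp [toAsyncpgScan, pvSplit, pvTail]
  | case2 t ih =>
    intro idx
    cases hS : pvSplit t with
    | nil => exact absurd hS (pvSplit_ne_nil t)
    | cons a b => simp [toAsyncpgScan, pvSplit, pvTail, ih, hS]
  | case3 c t h1 heq ih =>
    exact absurd heq (pvSplit_ne_nil t)
  | case4 c t h1 a b heq ih =>
    intro idx
    rw [scan_cons c t idx h1, pvSplit_cons c t h1, heq]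
    cases hb : b with
    | nil =>
      subst hb
      have := ih idx
      simp [heq] at this
      simp [this, pvTail]
    | cons b0 bs =>
      have := ih idx
      simp [heq, hb] at this
      simp [this, pvTail]

-- ===== VERDICT (by name: the statement is the Claim_ definition above) =====
theorem to_asyncpg_format_spec : Claim_equal_to_asyncpg_format := by
  intro query params _
  unfold Spec_to_asyncpg_format to_asyncpg_format to_asyncpg_format_alt
  simp only [splitOn_eq_pvSplit, foldl_rebuild]
  rw [scan_eq_split]
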